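-- pv_equiv track=rewrite | github.com/glygener/glygen-backend-integration | object-maker/update-batch-proteindb.py | get_by_glycosylation_type
-- ===== SOURCE A (Python) =====
-- def get_by_glycosylation_type(glycosylation_type):
--
--     c_list = []
--     tmp_list = glycosylation_type.replace(" ", "").split(";")
--     val_list = ["n-linked|complex","n-linked|high mannose","n-linked|hybrid","n-linked|other"]
--     val_list += ["o-linked|o-fucosylation", "o-linked|o-galactosylation","o-linked|o-galnacylation"]
--     val_list += ["o-linked|o-glcnacylation","o-linked|o-glucosylation","o-linked|o-mannosylation"]
--     val_list += ["o-linked|other","c-linked|c-mannosylation","c-linked|other","s-linked|other"]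
--     for val in val_list:
--         c_list.append("1" if val in tmp_list else "0")
--     return "".join(c_list)
-- ===== SOURCE B (Python) =====
-- _VALS = ["n-linked|complex", "n-linked|high mannose", "n-linked|hybrid", "n-linked|other",
--          "o-linked|o-fucosylation", "o-linked|o-galactosylation", "o-linked|o-galnacylation",
--          "o-linked|o-glcnacylation", "o-linked|o-glucosylation", "o-linked|o-mannosylation",
--          "o-linked|other", "c-linked|c-mannosylation", "c-linked|other", "s-linked|other"]
-- _IDX = {v: i for i, v in enumerate(_VALS)}
--
--
-- def get_by_glycosylation_type(glycosylation_type):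
--     bits = ["0"] * 14
--     for tok in glycosylation_type.replace(" ", "").split(";"):
--         i = _IDX.get(tok)
--         if i is not None:
--             bits[i] = "1"
--     return "".join(bits)
-- ===== Notes on version B (the rewrite author's own statement) =====
-- stated objective: alternative
-- what changed: A scans the token list once per each of the 14 known values; B builds a value-to-index dict once and makes a single pass over the input tokens, setting bits in a 14-slot bit array, reversing the traversal.
import Mathlib
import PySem

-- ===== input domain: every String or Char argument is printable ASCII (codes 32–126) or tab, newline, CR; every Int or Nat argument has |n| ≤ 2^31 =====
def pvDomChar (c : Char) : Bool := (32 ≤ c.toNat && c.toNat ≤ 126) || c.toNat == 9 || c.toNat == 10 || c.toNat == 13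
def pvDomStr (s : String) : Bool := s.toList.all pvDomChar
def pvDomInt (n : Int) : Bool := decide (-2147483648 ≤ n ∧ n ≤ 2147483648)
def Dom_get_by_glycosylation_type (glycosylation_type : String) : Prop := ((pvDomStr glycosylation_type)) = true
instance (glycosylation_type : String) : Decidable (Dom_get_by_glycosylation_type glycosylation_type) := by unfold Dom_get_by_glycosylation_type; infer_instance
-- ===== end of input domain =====

-- B replaces A's 14 membership scans of the token list by one pass over the tokens with an
-- index table and a bit array (objective: alternative decomposition, same exact output).

-- ===== PORT A =====
def get_by_glycosylation_type (glycosylation_type : String) : String :=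
  let c_list : List String := []
  let tmp_list := (PySem.Str.split? (PySem.Str.replace glycosylation_type " " "") ";").getD []  -- sep ";" ≠ "": split? is some (exact)
  let val_list := ["n-linked|complex", "n-linked|high mannose", "n-linked|hybrid", "n-linked|other"]
  let val_list := val_list ++ ["o-linked|o-fucosylation", "o-linked|o-galactosylation", "o-linked|o-galnacylation"]
  let val_list := val_list ++ ["o-linked|o-glcnacylation", "o-linked|o-glucosylation", "o-linked|o-mannosylation"]
  let val_list := val_list ++ ["o-linked|other", "c-linked|c-mannosylation", "c-linked|other", "s-linked|other"]
  let c_list := val_list.foldl (fun acc val => acc ++ [if List.contains tmp_list val then "1" else "0"]) c_list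
  PySem.Str.join "" c_list

-- ===== PORT B =====
def pvVals : List String :=
  ["n-linked|complex", "n-linked|high mannose", "n-linked|hybrid", "n-linked|other",
   "o-linked|o-fucosylation", "o-linked|o-galactosylation", "o-linked|o-galnacylation",
   "o-linked|o-glcnacylation", "o-linked|o-glucosylation", "o-linked|o-mannosylation",
   "o-linked|other", "c-linked|c-mannosylation", "c-linked|other", "s-linked|other"]

-- _IDX = {v: i for i, v in enumerate(_VALS)}
def pvIdx : PySem.Dict String Int :=
  (PySem.List.enumerate pvVals 0).foldl (fun d p => d.insert p.2 p.1) PySem.Dict.empty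

def get_by_glycosylation_type_alt (glycosylation_type : String) : String :=
  let bits := PySem.List.pyRepeat ["0"] 14
  let toks := (PySem.Str.split? (PySem.Str.replace glycosylation_type " " "") ";").getD []  -- sep ";" ≠ "": split? is some (exact)
  let bits := toks.foldl
    (fun bits tok =>
      match pvIdx.get? tok with
      -- i comes from the dict, so 0 ≤ i < 14 = len(bits): Python's bits[i] = "1" never raises; pySetD is exact here
      | some i => PySem.List.pySetD bits i "1"
      | none => bits) bits
  PySem.Str.join "" bits

-- ===== PRECONDITION & SPEC =====
def Spec_get_by_glycosylation_type (glycosylation_type : String) (out : String) : Prop := out = get_by_glycosylation_type_alt glycosylation_type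
instance (glycosylation_type : String) (out : String) : Decidable (Spec_get_by_glycosylation_type glycosylation_type out) := by unfold Spec_get_by_glycosylation_type; infer_instance

-- ===== CLAIM (what is proved, stated in full; the proofs are below) =====
def Claim_equal_get_by_glycosylation_type : Prop := ∀ (glycosylation_type : String), Dom_get_by_glycosylation_type glycosylation_type → Spec_get_by_glycosylation_type glycosylation_type (get_by_glycosylation_type glycosylation_type)

-- ===== LEMMAS AND PROOFS =====

-- B's loop body, named so the lemmas can speak about one step
def pvStep (bits : List String) (tok : String) : List String :=
  match pvIdx.get? tok with
  | some i => PySem.List.pySetD bits i "1"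
  | none => bits

-- lookup in a dict built by {v: i for i, v in enumerate(l, s)}: position of the first occurrence
theorem get?_mk_enum (l : List String) (s : Int) (tok : String) :
    (PySem.Dict.mk ((PySem.List.enumerate l s).map (fun p => (p.2, p.1)))).get? tok
      = if tok ∈ l then some (s + (l.idxOf tok : Int)) else none := by
  induction l generalizing s with
  | nil => simp [PySem.List.enumerate_nil, PySem.Dict.get?]
  | cons x xs ih =>
    rw [PySem.List.enumerate_cons]
    simp only [List.map, PySem.Dict.get?_mk_cons]
    by_cases hx : x = tok
    · subst hx; simp [List.idxOf_cons_self]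
    · rw [if_neg (by simpa using hx), ih (s+1)]
      by_cases hm : tok ∈ xs
      · rw [if_pos hm, if_pos (by simp [hm])]
        rw [List.idxOf_cons_ne _ (by simpa using hx)]
        push_cast; ring_nf
      · rw [if_neg hm, if_neg (by simp [hm, Ne.symm hx])]

theorem pvIdx_eq : pvIdx = PySem.Dict.mk ((PySem.List.enumerate pvVals 0).map (fun p => (p.2, p.1))) := by decide

theorem pvVals_nodup : pvVals.Nodup := by decide

-- one step of B's loop on a bit array indexed like pvVals
theorem pvStep_map (tok : String) (f : String → String) :
    pvStep (pvVals.map f) tok = pvVals.map (fun v => if v = tok then "1" else f v) := by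
  unfold pvStep
  rw [pvIdx_eq, get?_mk_enum]
  by_cases hm : tok ∈ pvVals
  · rw [if_pos hm]
    have hj : pvVals.idxOf tok < pvVals.length := List.idxOf_lt_length_of_mem hm
    have hget : pvVals[pvVals.idxOf tok] = tok := List.getElem_idxOf hj
    simp only [zero_add, PySem.List.pySetD_natCast]
    apply List.ext_getElem
    · simp
    · intro k hk1 hk2
      simp only [List.length_set, List.length_map] at hk1
      rw [List.getElem_set, List.getElem_map, List.getElem_map]
      by_cases hkj : pvVals.idxOf tok = k
      · subst hkj; rw [if_pos rfl, if_pos hget]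
      · rw [if_neg hkj, if_neg (fun hc => hkj
          (pvVals_nodup.getElem_inj_iff.mp (by rw [hget, hc])).symm)]
  · rw [if_neg hm]
    symm
    apply List.map_congr_left
    intro v hv
    exact if_neg (fun hc : v = tok => hm (hc ▸ hv))

-- B's whole loop: bit v is "1" exactly when v occurred among the tokens
theorem pvFold_map (ts : List String) (f : String → String) :
    ts.foldl pvStep (pvVals.map f) = pvVals.map (fun v => if ts.contains v then "1" else f v) := by
  induction ts generalizing f with
  | nil => simp
  | cons t ts ih =>
    rw [List.foldl_cons, pvStep_map, ih]
    apply List.map_congr_left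
    intro v hv
    by_cases h1 : ts.contains v
    · simp only [List.contains_iff_mem] at h1; simp [h1]
    · simp only [List.contains_iff_mem] at h1; by_cases h2 : v = t <;> simp [h1, h2]

-- A's and B's bodies agree for ANY token list ts
theorem pvMain (ts : List String) :
    PySem.Str.join "" (pvVals.foldl (fun acc val => acc ++ [if List.contains ts val then "1" else "0"]) [])
      = PySem.Str.join "" (ts.foldl pvStep (PySem.List.pyRepeat ["0"] 14)) := by
  rw [PySem.List.foldl_append_singleton_eq_map,
      show (PySem.List.pyRepeat (["0"] : List String) 14) = pvVals.map (fun _ => "0") from rfl,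
      pvFold_map]
  simp only [List.nil_append, List.contains_iff_mem]

-- ===== VERDICT (by name: the statement is the Claim_ definition above) =====
theorem get_by_glycosylation_type_spec : Claim_equal_get_by_glycosylation_type := by
  intro g _
  exact pvMain ((PySem.Str.split? (PySem.Str.replace g " " "") ";").getD [])
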